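-- pv_equiv track=rewrite | github.com/esh22nika/Abhayam-Women-Safety | violence_tracker.py | detect_violence_against_women
-- ===== SOURCE A (Python) =====
-- def detect_violence_against_women(player_detections, player_genders, player_labels):
--     violence_against_women = False
--     fighting_detected = False
--
--     for id1, bbox1 in player_detections.items():
--         for id2, bbox2 in player_detections.items():
--             if id1 >= id2:
--                 continue
--
--             # Check if one person is female and the other is male
--             female_id = male_id = None
--             if player_genders.get(id1) == "a person who is female" and player_genders.get(id2) == "a person who is male":
--                 female_id, male_id = id1, id2
--             elif player_genders.get(id1) == "a person who is male" and player_genders.get(id2) == "a person who is female":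
--                 female_id, male_id = id2, id1
--
--             # If a male-female pair exists, check for violent actions
--             if female_id and male_id:
--                 female_action = player_labels.get(female_id, "")
--                 male_action = player_labels.get(male_id, "")
--
--                 # Specific violence indicators involving male aggression towards female
--                 violent_actions = [
--                     "two people fighting", "a person hitting", "a person slapping", "a person punching",
--                     "a person kicking", "a person grabbing something",
--                     "a person being aggressive", "a person being attacked",
--                     "a person defending themselves"
--                 ]
--
--                 if any(action in male_action for action in violent_actions):
--                     violence_against_women = True
--                     break
--
--     # Check if "two people fighting" is detected with at least one female
--     for track_id, action in player_labels.items():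
--         if action == "two people fighting" and "a person who is female" in player_genders.values():
--             fighting_detected = True
--
--     return violence_against_women or fighting_detected
-- ===== SOURCE B (Python) =====
-- VIOLENT_ACTIONS = (
--     "two people fighting", "a person hitting", "a person slapping", "a person punching",
--     "a person kicking", "a person grabbing something",
--     "a person being aggressive", "a person being attacked",
--     "a person defending themselves"
-- )
--
--
-- def detect_violence_against_women(player_detections, player_genders, player_labels):
--     # One linear pass over the detections: is any detected person female,
--     # and does any detected male perform a violent action?
--     any_female = False
--     any_violent_male = False
--     for pid in player_detections:
--         gender = player_genders.get(pid)
--         if gender == "a person who is female":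
--             any_female = True
--         elif gender == "a person who is male":
--             if any(a in player_labels.get(pid, "") for a in VIOLENT_ACTIONS):
--                 any_violent_male = True
--     if any_female and any_violent_male:
--         return True
--     return ("two people fighting" in player_labels.values()
--             and "a person who is female" in player_genders.values())
-- ===== Notes on version B (the rewrite author's own statement) =====
-- stated objective: faster
-- what changed: Replaced A's quadratic scan over all ordered pairs of detection ids by a single linear pass recording whether any detected person is female and whether any detected male has a violent action, then combining the two flags.
-- intended difference: On inputs where a male-female pair with a violent male exists among the detections but every such pair involves track id 0 (so A's 'if female_id and male_id' truthiness test skips it) and the fighting-label fallback does not fire, A returns False while B returns True; B's value is intended because id 0 is a valid track id and the truthiness test is an evident 'is not None' slip. — e.g. on detect_violence_against_women([(0, []), (1, [])], [(0, "a person who is female"), (1, "a person who is male")], [(1, "a person hitting")]): A returns false, B returns true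
import Mathlib
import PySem

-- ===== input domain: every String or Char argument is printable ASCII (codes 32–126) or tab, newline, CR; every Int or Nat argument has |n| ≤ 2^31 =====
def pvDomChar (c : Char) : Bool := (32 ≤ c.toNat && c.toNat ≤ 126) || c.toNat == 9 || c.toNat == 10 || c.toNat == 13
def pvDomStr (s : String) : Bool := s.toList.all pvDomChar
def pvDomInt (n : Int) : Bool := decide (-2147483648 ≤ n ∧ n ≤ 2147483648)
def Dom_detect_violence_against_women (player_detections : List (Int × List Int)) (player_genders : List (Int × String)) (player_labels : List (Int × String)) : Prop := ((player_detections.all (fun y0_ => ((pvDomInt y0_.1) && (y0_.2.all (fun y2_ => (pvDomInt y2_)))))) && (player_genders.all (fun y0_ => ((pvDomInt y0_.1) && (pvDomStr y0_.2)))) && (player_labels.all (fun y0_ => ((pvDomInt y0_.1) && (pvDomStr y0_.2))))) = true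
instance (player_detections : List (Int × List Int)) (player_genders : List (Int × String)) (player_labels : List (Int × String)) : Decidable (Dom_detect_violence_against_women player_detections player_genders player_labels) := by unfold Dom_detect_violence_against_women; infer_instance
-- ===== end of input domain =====

-- B replaces A's quadratic scan over all ordered pairs of detections by one linear pass
-- (objective: asymptotically faster); B intentionally also counts track id 0, which A's
-- truthiness test accidentally skips (see D_ below).

-- ===== PORT A =====
def pvViolentActions : List String :=
  ["two people fighting", "a person hitting", "a person slapping", "a person punching",
   "a person kicking", "a person grabbing something",
   "a person being aggressive", "a person being attacked",
   "a person defending themselves"]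

-- named subconditions of A's code (gender lookups, the violent-substring test, the
-- fighting-loop body), shared with D_ below
abbrev pvTruthy (k : Int) : Prop := k ≠ 0
abbrev pvFemAt (g : PySem.Dict Int String) (k : Int) : Prop :=
  g.get? k = some "a person who is female"
abbrev pvMaleAt (g : PySem.Dict Int String) (k : Int) : Prop :=
  g.get? k = some "a person who is male"
def pvViolentAt (l : PySem.Dict Int String) (k : Int) : Bool :=
  pvViolentActions.any (fun action => PySem.Str.isIn action (l.getD k ""))
abbrev pvFightHit (g : PySem.Dict Int String) (q : Int × String) : Prop :=
  q.2 = "two people fighting" ∧ "a person who is female" ∈ g.values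

-- the inner 'for id2, bbox2 in player_detections.items()' loop with its 'break'
def pvInnerA (g : PySem.Dict Int String) (l : PySem.Dict Int String) (id1 : Int) :
    List (Int × List Int) → Bool
  | [] => false
  | (id2, _) :: rest =>
    if id1 ≥ id2 then pvInnerA g l id1 rest
    else
      let fm : Option (Int × Int) :=
        if pvFemAt g id1 ∧ pvMaleAt g id2 then some (id1, id2)
        else if pvMaleAt g id1 ∧ pvFemAt g id2 then some (id2, id1)
        else none
      match fm with
      | some (female_id, male_id) =>
        -- Python truthiness: 'if female_id and male_id' — both ids set and nonzero
        if pvTruthy female_id ∧ pvTruthy male_id then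
          if pvViolentAt l male_id then true
          else pvInnerA g l id1 rest
        else pvInnerA g l id1 rest
      | none => pvInnerA g l id1 rest

def detect_violence_against_women (player_detections : List (Int × List Int)) (player_genders : List (Int × String)) (player_labels : List (Int × String)) : Bool :=
  let d := PySem.Dict.ofList player_detections
  let g := PySem.Dict.ofList player_genders
  let l := PySem.Dict.ofList player_labels
  let violence_against_women :=
    d.items.foldl (fun acc p => acc || pvInnerA g l p.1 d.items) false
  let fighting_detected :=
    l.items.foldl (fun acc p => if pvFightHit g p then true else acc) false
  violence_against_women || fighting_detected

-- ===== PORT B =====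
def pvStepB (g : PySem.Dict Int String) (l : PySem.Dict Int String)
    (st : Bool × Bool) (p : Int × List Int) : Bool × Bool :=
  match g.get? p.1 with
  | some gender =>
    if gender = "a person who is female" then (true, st.2)
    else if gender = "a person who is male" then
      (st.1, st.2 || pvViolentActions.any (fun a => PySem.Str.isIn a (l.getD p.1 "")))
    else st
  | none => st

def detect_violence_against_women_alt (player_detections : List (Int × List Int)) (player_genders : List (Int × String)) (player_labels : List (Int × String)) : Bool :=
  let d := PySem.Dict.ofList player_detections
  let g := PySem.Dict.ofList player_genders
  let l := PySem.Dict.ofList player_labels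
  let st := d.items.foldl (pvStepB g l) (false, false)
  if st.1 && st.2 then true
  else ("two people fighting" ∈ l.values) && ("a person who is female" ∈ g.values)

-- ===== PRECONDITION & SPEC =====
-- On inputs where a female and a violent male exist among the detections but only with track id 0
-- on one side (A's 'if female_id and male_id' truthiness skips id 0) and the fighting-label
-- fallback does not fire, A returns False and B returns True; B's value is intended since id 0
-- is a valid track id and the truthiness test is an evident 'is not None' slip.
def D_detect_violence_against_women (player_detections : List (Int × List Int)) (player_genders : List (Int × String)) (player_labels : List (Int × String)) : Prop :=
  let g := PySem.Dict.ofList player_genders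
  let l := PySem.Dict.ofList player_labels
  ¬(∃ q ∈ l.items, pvFightHit g q) ∧
  (∃ p ∈ player_detections, pvFemAt g p.1) ∧
  (∃ p ∈ player_detections, pvMaleAt g p.1 ∧ pvViolentAt l p.1) ∧
  ¬((∃ p ∈ player_detections, pvTruthy p.1 ∧ pvFemAt g p.1) ∧
    (∃ p ∈ player_detections, pvTruthy p.1 ∧ pvMaleAt g p.1 ∧ pvViolentAt l p.1))
instance (player_detections : List (Int × List Int)) (player_genders : List (Int × String)) (player_labels : List (Int × String)) : Decidable (D_detect_violence_against_women player_detections player_genders player_labels) := by unfold D_detect_violence_against_women; infer_instance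

def Spec_detect_violence_against_women (player_detections : List (Int × List Int)) (player_genders : List (Int × String)) (player_labels : List (Int × String)) (out : Bool) : Prop := ¬ D_detect_violence_against_women player_detections player_genders player_labels → out = detect_violence_against_women_alt player_detections player_genders player_labels
instance (player_detections : List (Int × List Int)) (player_genders : List (Int × String)) (player_labels : List (Int × String)) (out : Bool) : Decidable (Spec_detect_violence_against_women player_detections player_genders player_labels out) := by unfold Spec_detect_violence_against_women; infer_instance

def pvDiffWitness_detect_violence_against_women : (List (Int × List Int)) × (List (Int × String)) × (List (Int × String)) :=
  ([(0, []), (1, [])],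
   [(0, "a person who is female"), (1, "a person who is male")],
   [(1, "a person hitting")])
def pvDiffWitnessOut_detect_violence_against_women : Bool × Bool := (false, true)

-- ===== CLAIM (what is proved, stated in full; the proofs are below) =====
def Claim_unchanged_detect_violence_against_women : Prop := ∀ (player_detections : List (Int × List Int)) (player_genders : List (Int × String)) (player_labels : List (Int × String)), Dom_detect_violence_against_women player_detections player_genders player_labels → Spec_detect_violence_against_women player_detections player_genders player_labels (detect_violence_against_women player_detections player_genders player_labels)
def Claim_changed_detect_violence_against_women : Prop := Dom_detect_violence_against_women (pvDiffWitness_detect_violence_against_women.1) (pvDiffWitness_detect_violence_against_women.2.1) (pvDiffWitness_detect_violence_against_women.2.2) ∧ D_detect_violence_against_women (pvDiffWitness_detect_violence_against_women.1) (pvDiffWitness_detect_violence_against_women.2.1) (pvDiffWitness_detect_violence_against_women.2.2) ∧ detect_violence_against_women (pvDiffWitness_detect_violence_against_women.1) (pvDiffWitness_detect_violence_against_women.2.1) (pvDiffWitness_detect_violence_against_women.2.2) = pvDiffWitnessOut_detect_violence_against_women.1 ∧ detect_violence_against_women_alt (pvDiffWitness_detect_violence_against_women.1) (pvDiffWitness_detect_violence_against_women.2.1)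 (pvDiffWitness_detect_violence_against_women.2.2) = pvDiffWitnessOut_detect_violence_against_women.2 ∧ pvDiffWitnessOut_detect_violence_against_women.1 ≠ pvDiffWitnessOut_detect_violence_against_women.2
def Claim_exact_detect_violence_against_women : Prop := ∀ (player_detections : List (Int × List Int)) (player_genders : List (Int × String)) (player_labels : List (Int × String)), Dom_detect_violence_against_women player_detections player_genders player_labels → D_detect_violence_against_women player_detections player_genders player_labels → detect_violence_against_women player_detections player_genders player_labels ≠ detect_violence_against_women_alt player_detections player_genders player_labels

-- ===== LEMMAS AND PROOFS =====

-- per-key boolean predicates (proof-side abbreviations)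
def pvFB (g : PySem.Dict Int String) (k : Int) : Bool := decide (pvFemAt g k)
def pvMB (g l : PySem.Dict Int String) (k : Int) : Bool :=
  decide (pvMaleAt g k) && pvViolentAt l k

-- per-key predicates A's pair scan tests (include A's 'nonzero id' truthiness)
def pvIsF (g : PySem.Dict Int String) (k : Int) : Bool := decide (k ≠ 0) && pvFB g k
def pvIsM (g : PySem.Dict Int String) (l : PySem.Dict Int String) (k : Int) : Bool :=
  decide (k ≠ 0) && pvMB g l k

-- the per-pair condition A's inner loop tests
def pvPair (g l : PySem.Dict Int String) (i j : Int) : Bool :=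
  decide (i < j) && ((pvIsF g i && pvIsM g l j) || (pvIsM g l i && pvIsF g j))

theorem pvInnerA_eq_any (g l : PySem.Dict Int String) (id1 : Int) (xs : List (Int × List Int)) :
    pvInnerA g l id1 xs = xs.any (fun q => pvPair g l id1 q.1) := by
  induction xs with
  | nil => rfl
  | cons q rest ih =>
    obtain ⟨id2, bb⟩ := q
    rw [List.any_cons, ← ih]
    simp only [pvInnerA]
    generalize pvInnerA g l id1 rest = b
    by_cases hge : id1 ≥ id2
    · rw [if_pos hge]
      simp [pvPair, show ¬ id1 < id2 by omega]
    · have hlt : id1 < id2 := by omega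
      rw [if_neg hge]
      simp only [pvTruthy, pvPair, pvIsF, pvIsM, pvFB, pvMB]
      by_cases h1 : pvFemAt g id1 ∧ pvMaleAt g id2
      · rw [if_pos h1]
        dsimp only
        by_cases hz : id1 ≠ 0 ∧ id2 ≠ 0
        · rw [if_pos hz]
          cases hv : pvViolentAt l id2 with
          | true => simp [hlt, hz.1, hz.2, hv]; tauto
          | false =>
            have hng : ¬ pvMaleAt g id1 := by
              intro hm; rw [pvMaleAt] at hm; rw [pvFemAt] at h1
              rw [h1.1] at hm; simp at hm
            simp [h1.1, h1.2, hv, hng]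
        · rw [if_neg hz]
          rcases not_and_or.mp hz with h0 | h0 <;> simp [not_not.mp h0]
      · rw [if_neg h1]
        by_cases h2 : pvMaleAt g id1 ∧ pvFemAt g id2
        · rw [if_pos h2]
          dsimp only
          by_cases hz : id2 ≠ 0 ∧ id1 ≠ 0
          · rw [if_pos hz]
            cases hv : pvViolentAt l id1 with
            | true => simp [hlt, hz.1, hz.2, hv]; tauto
            | false =>
              have hng : ¬ pvFemAt g id1 := by
                intro hm; rw [pvMaleAt] at h2; rw [pvFemAt] at hm
                rw [h2.1] at hm; simp at hm
              simp [h2.1, h2.2, hv, hng]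
          · rw [if_neg hz]
            rcases not_and_or.mp hz with h0 | h0 <;> simp [not_not.mp h0]
        · rw [if_neg h2]
          rcases not_and_or.mp h1 with h | h <;> rcases not_and_or.mp h2 with h' | h' <;>
            simp [h, h']

theorem pv_foldl_or (f : Int × List Int → Bool) (xs : List (Int × List Int)) (acc : Bool) :
    xs.foldl (fun a p => a || f p) acc = (acc || xs.any f) := by
  induction xs generalizing acc with
  | nil => simp
  | cons x rest ih => rw [List.foldl_cons, ih, List.any_cons, Bool.or_assoc]

theorem pv_foldl_if (c : Int × String → Prop) [DecidablePred c]
    (xs : List (Int × String)) (acc : Bool) :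
    xs.foldl (fun a p => if c p then true else a) acc = (acc || xs.any (fun p => decide (c p))) := by
  induction xs generalizing acc with
  | nil => simp
  | cons x rest ih =>
    by_cases hx : c x
    · rw [List.foldl_cons, if_pos hx, ih, List.any_cons]; simp [hx]
    · rw [List.foldl_cons, if_neg hx, ih, List.any_cons]; simp [hx]

theorem pvStepB_eq (g l : PySem.Dict Int String) (st : Bool × Bool) (p : Int × List Int) :
    pvStepB g l st p = (st.1 || pvFB g p.1, st.2 || pvMB g l p.1) := by
  cases hg : g.get? p.1 with
  | none => simp [pvStepB, hg, pvFB, pvMB, pvFemAt, pvMaleAt]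
  | some s =>
    by_cases hf : s = "a person who is female"
    · simp [pvStepB, hg, pvFB, pvMB, pvFemAt, pvMaleAt, pvViolentAt, hf]
    · by_cases hm : s = "a person who is male"
      · simp [pvStepB, hg, pvFB, pvMB, pvFemAt, pvMaleAt, pvViolentAt, hf, hm]
      · simp [pvStepB, hg, pvFB, pvMB, pvFemAt, pvMaleAt, hf, hm]

theorem pvFoldB_eq (g l : PySem.Dict Int String) (xs : List (Int × List Int)) (st : Bool × Bool) :
    xs.foldl (pvStepB g l) st =
      (st.1 || xs.any (fun p => pvFB g p.1), st.2 || xs.any (fun p => pvMB g l p.1)) := by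
  induction xs generalizing st with
  | nil => simp
  | cons x rest ih => simp [List.foldl_cons, pvStepB_eq, ih, Bool.or_assoc]

-- A's pairwise existential collapses to "some nonzero-id female and some nonzero-id violent male"
theorem pvIsF_iff (g : PySem.Dict Int String) (k : Int) :
    pvIsF g k = true ↔ k ≠ 0 ∧ pvFemAt g k := by
  simp [pvIsF, pvFB]

theorem pvIsM_iff (g l : PySem.Dict Int String) (k : Int) :
    pvIsM g l k = true ↔ k ≠ 0 ∧ pvMaleAt g k ∧ pvViolentAt l k = true := by
  simp [pvIsM, pvMB, and_assoc]

theorem pv_pair_iff (g l : PySem.Dict Int String) (xs : List (Int × List Int)) :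
    (xs.any (fun p => xs.any (fun q => pvPair g l p.1 q.1)))
      = (xs.any (fun p => pvIsF g p.1) && xs.any (fun p => pvIsM g l p.1)) := by
  rw [Bool.eq_iff_iff]
  simp only [List.any_eq_true, Bool.and_eq_true, pvPair, Bool.or_eq_true, decide_eq_true_eq]
  constructor
  · rintro ⟨p, hp, q, hq, -, ⟨hf, hm⟩ | ⟨hm, hf⟩⟩
    · exact ⟨⟨p, hp, hf⟩, ⟨q, hq, hm⟩⟩
    · exact ⟨⟨q, hq, hf⟩, ⟨p, hp, hm⟩⟩
  · rintro ⟨⟨pf, hpf, hfF⟩, ⟨pm, hpm, hmM⟩⟩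
    have h1 : pvFemAt g pf.1 := ((pvIsF_iff g pf.1).mp hfF).2
    have h2 : pvMaleAt g pm.1 := ((pvIsM_iff g l pm.1).mp hmM).2.1
    have hne : pf.1 ≠ pm.1 := by
      intro he
      unfold pvFemAt at h1; unfold pvMaleAt at h2
      rw [he, h2] at h1; simp at h1
    rcases lt_or_gt_of_ne hne with hlt | hgt
    · exact ⟨pf, hpf, pm, hpm, hlt, Or.inl ⟨hfF, hmM⟩⟩
    · exact ⟨pm, hpm, pf, hpf, hgt, Or.inr ⟨hmM, hfF⟩⟩

-- the second loop of A computes the values-membership conjunction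
theorem pv_fight_eq (g l : PySem.Dict Int String) :
    l.items.any (fun p => decide (pvFightHit g p))
      = (decide ("two people fighting" ∈ l.values) && decide ("a person who is female" ∈ g.values)) := by
  rw [Bool.eq_iff_iff]
  simp only [List.any_eq_true, Bool.and_eq_true, decide_eq_true_eq, pvFightHit,
    PySem.Dict.values, List.mem_map]
  constructor
  · rintro ⟨p, hp, hv, hf⟩; exact ⟨⟨p, hp, hv⟩, hf⟩
  · rintro ⟨⟨p, hp, hv⟩, hf⟩; exact ⟨p, hp, hv, hf⟩

-- closed-form values of the two ports
theorem pvA_eq (pd : List (Int × List Int)) (pg pl : List (Int × String)) :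
    detect_violence_against_women pd pg pl
      = (((PySem.Dict.ofList pd).items.any (fun p => pvIsF (PySem.Dict.ofList pg) p.1) &&
          (PySem.Dict.ofList pd).items.any (fun p => pvIsM (PySem.Dict.ofList pg) (PySem.Dict.ofList pl) p.1)) ||
         (decide ("two people fighting" ∈ (PySem.Dict.ofList pl).values) &&
          decide ("a person who is female" ∈ (PySem.Dict.ofList pg).values))) := by
  unfold detect_violence_against_women
  simp only [pv_foldl_or, pv_foldl_if, Bool.false_or]
  have hany : (PySem.Dict.ofList pd).items.any
      (fun p => pvInnerA (PySem.Dict.ofList pg) (PySem.Dict.ofList pl) p.1 (PySem.Dict.ofList pd).items)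
      = (PySem.Dict.ofList pd).items.any (fun p => (PySem.Dict.ofList pd).items.any
          (fun q => pvPair (PySem.Dict.ofList pg) (PySem.Dict.ofList pl) p.1 q.1)) := by
    simp only [pvInnerA_eq_any]
  rw [hany, pv_pair_iff, pv_fight_eq]

theorem pvB_eq (pd : List (Int × List Int)) (pg pl : List (Int × String)) :
    detect_violence_against_women_alt pd pg pl
      = (((PySem.Dict.ofList pd).items.any (fun p => pvFB (PySem.Dict.ofList pg) p.1) &&
          (PySem.Dict.ofList pd).items.any (fun p => pvMB (PySem.Dict.ofList pg) (PySem.Dict.ofList pl) p.1)) ||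
         (decide ("two people fighting" ∈ (PySem.Dict.ofList pl).values) &&
          decide ("a person who is female" ∈ (PySem.Dict.ofList pg).values))) := by
  unfold detect_violence_against_women_alt
  simp only [pvFoldB_eq, Bool.false_or]
  cases hF : (PySem.Dict.ofList pd).items.any (fun p => pvFB (PySem.Dict.ofList pg) p.1) <;>
  cases hM : (PySem.Dict.ofList pd).items.any (fun p => pvMB (PySem.Dict.ofList pg) (PySem.Dict.ofList pl) p.1) <;>
    simp

-- membership in (ofList l).items, projected to keys, is membership in l
theorem pvEx_insert {ν : Type} (d : PySem.Dict Int ν) (k : Int) (v : ν) (P : Int → Prop) :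
    (∃ p ∈ (d.insert k v).items, P p.1) ↔ P k ∨ ∃ p ∈ d.items, P p.1 := by
  constructor
  · rintro ⟨p, hp, hP⟩
    rcases (PySem.Dict.mem_items_insert d k v p).mp hp with h | ⟨h, _⟩
    · left; rw [h] at hP; exact hP
    · right; exact ⟨p, h, hP⟩
  · rintro (h | ⟨p, hp, hP⟩)
    · exact ⟨(k, v), PySem.Dict.mem_items_insert_self d k v, h⟩
    · by_cases hk : p.1 = k
      · exact ⟨(k, v), PySem.Dict.mem_items_insert_self d k v, by rw [← hk]; exact hP⟩
      · exact ⟨p, (PySem.Dict.mem_items_insert d k v p).mpr (Or.inr ⟨hp, hk⟩), hP⟩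

theorem pvEx_update {ν : Type} (l : List (Int × ν)) (d : PySem.Dict Int ν) (P : Int → Prop) :
    (∃ p ∈ (d.update l).items, P p.1) ↔ (∃ p ∈ d.items, P p.1) ∨ ∃ p ∈ l, P p.1 := by
  induction l generalizing d with
  | nil => simp [PySem.Dict.update]
  | cons x rest ih =>
    rw [show d.update (x :: rest) = (d.insert x.1 x.2).update rest from rfl, ih, pvEx_insert]
    simp only [List.mem_cons]
    constructor
    · rintro ((h | h) | ⟨p, hp, hP⟩)
      · exact Or.inr ⟨x, Or.inl rfl, h⟩
      · exact Or.inl h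
      · exact Or.inr ⟨p, Or.inr hp, hP⟩
    · rintro (h | ⟨p, hx | hp, hP⟩)
      · exact Or.inl (Or.inr h)
      · exact Or.inl (Or.inl (hx ▸ hP))
      · exact Or.inr ⟨p, hp, hP⟩

theorem pvEx_ofList {ν : Type} (l : List (Int × ν)) (P : Int → Prop) :
    (∃ p ∈ (PySem.Dict.ofList l).items, P p.1) ↔ ∃ p ∈ l, P p.1 := by
  rw [show PySem.Dict.ofList l = PySem.Dict.empty.update l from rfl, pvEx_update]
  simp [PySem.Dict.empty]

-- the boolean any-scans of the ports, as the ∃-conditions of D_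
theorem pvFany_iff (pd : List (Int × List Int)) (pg : List (Int × String)) :
    (PySem.Dict.ofList pd).items.any (fun p => pvFB (PySem.Dict.ofList pg) p.1) = true ↔
      ∃ p ∈ pd, pvFemAt (PySem.Dict.ofList pg) p.1 := by
  exact (List.any_eq_true).trans
    ((pvEx_ofList pd (fun k => pvFB (PySem.Dict.ofList pg) k = true)).trans
      (by simp [pvFB]))

theorem pvMany_iff (pd : List (Int × List Int)) (pg pl : List (Int × String)) :
    (PySem.Dict.ofList pd).items.any
        (fun p => pvMB (PySem.Dict.ofList pg) (PySem.Dict.ofList pl) p.1) = true ↔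
      ∃ p ∈ pd, pvMaleAt (PySem.Dict.ofList pg) p.1 ∧
        pvViolentAt (PySem.Dict.ofList pl) p.1 := by
  exact (List.any_eq_true).trans
    ((pvEx_ofList pd (fun k => pvMB (PySem.Dict.ofList pg) (PySem.Dict.ofList pl) k = true)).trans
      (by simp [pvMB]))

theorem pvF0any_iff (pd : List (Int × List Int)) (pg : List (Int × String)) :
    (PySem.Dict.ofList pd).items.any (fun p => pvIsF (PySem.Dict.ofList pg) p.1) = true ↔
      ∃ p ∈ pd, p.1 ≠ 0 ∧ pvFemAt (PySem.Dict.ofList pg) p.1 := by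
  exact (List.any_eq_true).trans
    ((pvEx_ofList pd (fun k => pvIsF (PySem.Dict.ofList pg) k = true)).trans
      (by simp [pvIsF, pvFB]))

theorem pvM0any_iff (pd : List (Int × List Int)) (pg pl : List (Int × String)) :
    (PySem.Dict.ofList pd).items.any
        (fun p => pvIsM (PySem.Dict.ofList pg) (PySem.Dict.ofList pl) p.1) = true ↔
      ∃ p ∈ pd, p.1 ≠ 0 ∧ pvMaleAt (PySem.Dict.ofList pg) p.1 ∧
        pvViolentAt (PySem.Dict.ofList pl) p.1 := by
  exact (List.any_eq_true).trans
    ((pvEx_ofList pd (fun k => pvIsM (PySem.Dict.ofList pg) (PySem.Dict.ofList pl) k = true)).trans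
      (by simp [pvIsM, pvMB, and_assoc]))

-- the fight clause of D_, as the values-membership conjunction of the ports
theorem pvFight_iff (pg pl : List (Int × String)) :
    (¬ ∃ q ∈ (PySem.Dict.ofList pl).items, pvFightHit (PySem.Dict.ofList pg) q) ↔
      (decide ("two people fighting" ∈ (PySem.Dict.ofList pl).values) &&
       decide ("a person who is female" ∈ (PySem.Dict.ofList pg).values)) = false := by
  rw [← pv_fight_eq (PySem.Dict.ofList pg) (PySem.Dict.ofList pl), Bool.eq_false_iff]
  exact not_congr (by simp [pvFightHit])

theorem pvD_iff (pd : List (Int × List Int)) (pg pl : List (Int × String)) :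
    D_detect_violence_against_women pd pg pl ↔
      ((decide ("two people fighting" ∈ (PySem.Dict.ofList pl).values) &&
        decide ("a person who is female" ∈ (PySem.Dict.ofList pg).values)) = false ∧
       (PySem.Dict.ofList pd).items.any (fun p => pvFB (PySem.Dict.ofList pg) p.1) = true ∧
       (PySem.Dict.ofList pd).items.any (fun p => pvMB (PySem.Dict.ofList pg) (PySem.Dict.ofList pl) p.1) = true ∧
       ((PySem.Dict.ofList pd).items.any (fun p => pvIsF (PySem.Dict.ofList pg) p.1) &&
        (PySem.Dict.ofList pd).items.any (fun p => pvIsM (PySem.Dict.ofList pg) (PySem.Dict.ofList pl) p.1)) = false) := by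
  unfold D_detect_violence_against_women
  constructor
  · rintro ⟨h1, h2, h3, h4⟩
    refine ⟨(pvFight_iff pg pl).mp h1, (pvFany_iff pd pg).mpr h2, (pvMany_iff pd pg pl).mpr h3, ?_⟩
    rcases not_and_or.mp h4 with h | h
    · rw [Bool.and_eq_false_iff]; left
      rw [Bool.eq_false_iff]
      intro hT
      exact h ((pvF0any_iff pd pg).mp hT)
    · rw [Bool.and_eq_false_iff]; right
      rw [Bool.eq_false_iff]
      intro hT
      exact h ((pvM0any_iff pd pg pl).mp hT)
  · rintro ⟨h1, h2, h3, h4⟩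
    refine ⟨(pvFight_iff pg pl).mpr h1, (pvFany_iff pd pg).mp h2, (pvMany_iff pd pg pl).mp h3, ?_⟩
    rintro ⟨hF0, hM0⟩
    rcases Bool.and_eq_false_iff.mp h4 with h | h
    · rw [(pvF0any_iff pd pg).mpr hF0] at h; cases h
    · rw [(pvM0any_iff pd pg pl).mpr hM0] at h; cases h

-- ===== VERDICT (by name: the statements are the Claim_ definitions above) =====
theorem detect_violence_against_women_spec : Claim_unchanged_detect_violence_against_women := by
  intro pd pg pl _ hnd
  rw [pvA_eq, pvB_eq]
  rw [pvD_iff] at hnd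
  have hFi : ∀ p : Int × List Int, pvIsF (PySem.Dict.ofList pg) p.1 = true →
      pvFB (PySem.Dict.ofList pg) p.1 = true := by
    intro p h; exact ((Bool.and_eq_true _ _).mp h).2
  have hMi : ∀ p : Int × List Int,
      pvIsM (PySem.Dict.ofList pg) (PySem.Dict.ofList pl) p.1 = true →
      pvMB (PySem.Dict.ofList pg) (PySem.Dict.ofList pl) p.1 = true := by
    intro p h; exact ((Bool.and_eq_true _ _).mp h).2
  set F := (PySem.Dict.ofList pd).items.any (fun p => pvFB (PySem.Dict.ofList pg) p.1) with hFdef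
  set M := (PySem.Dict.ofList pd).items.any
      (fun p => pvMB (PySem.Dict.ofList pg) (PySem.Dict.ofList pl) p.1) with hMdef
  set F0 := (PySem.Dict.ofList pd).items.any (fun p => pvIsF (PySem.Dict.ofList pg) p.1) with hF0def
  set M0 := (PySem.Dict.ofList pd).items.any
      (fun p => pvIsM (PySem.Dict.ofList pg) (PySem.Dict.ofList pl) p.1) with hM0def
  set fight := (decide ("two people fighting" ∈ (PySem.Dict.ofList pl).values) &&
      decide ("a person who is female" ∈ (PySem.Dict.ofList pg).values)) with hfdef
  have hF0F : F0 = true → F = true := by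
    intro h
    rw [hF0def] at h
    rw [hFdef, List.any_eq_true]
    rcases List.any_eq_true.mp h with ⟨p, hp, hpf⟩
    exact ⟨p, hp, hFi p hpf⟩
  have hM0M : M0 = true → M = true := by
    intro h
    rw [hM0def] at h
    rw [hMdef, List.any_eq_true]
    rcases List.any_eq_true.mp h with ⟨p, hp, hpf⟩
    exact ⟨p, hp, hMi p hpf⟩
  cases hfight : fight with
  | true => simp [hfight]
  | false =>
    cases hF : F with
    | false =>
      have : F0 = false := by
        cases h0 : F0
        · rfl
        · rw [hF0F h0] at hF; exact absurd hF (by simp)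
      simp [this, hF]
    | true =>
      cases hM : M with
      | false =>
        have : M0 = false := by
          cases h0 : M0
          · rfl
          · rw [hM0M h0] at hM; exact absurd hM (by simp)
        simp [this, hM]
      | true =>
        have : (F0 && M0) = true := by
          cases h0 : (F0 && M0)
          · exact absurd ⟨hfight, hF, hM, h0⟩ hnd
          · rfl
        simp [this, hF, hM]

theorem detect_violence_against_women_changed : Claim_changed_detect_violence_against_women := by
  unfold Claim_changed_detect_violence_against_women; decide

theorem detect_violence_against_women_tight : Claim_exact_detect_violence_against_women := by
  intro pd pg pl _ hd
  rw [pvD_iff] at hd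
  obtain ⟨h1, h2, h3, h4⟩ := hd
  rw [pvA_eq, pvB_eq, h1, h2, h3, h4]
  simp
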